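-- pv_equiv track=rewrite | github.com/Zymo-Research/sim_digestion | sim_digestion/sim_digestion.py | get_bs_seq
-- ===== SOURCE A (Python) =====
-- def get_bs_seq(seq):
--     ''' Return the bisulfite converted input sequence.
--
--     Parameters
--     ----------
--     seq : str
--         The input DNA sequence.
--
--     Returns
--     -------
--     str
--         The bisulfite converted sequence.
--     '''
--     seq = seq.upper()
--
--     i = 0
--     while i<len(seq):
--         i = seq.find("C", i)
--         # Cannot find any C.
--         if i<0:
--             break
--         # The last C or non-CpG.
--         if i+1>=len(seq) or seq[i+1]!="G":
--             seq = seq[:i]+"T"+seq[i+1:]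
--         i += 1
--     return seq
-- ===== SOURCE B (Python) =====
-- def get_bs_seq(seq):
--     ''' Return the bisulfite converted input sequence. '''
--     parts = seq.upper().split("CG")
--     return "CG".join(p.replace("C", "T") for p in parts)
-- ===== Notes on version B (the rewrite author's own statement) =====
-- stated objective: faster
-- what changed: Replaced the index/find loop that re-splices the whole string for every converted cytosine with a partition: split the uppercased sequence on the CpG dimer (so no part contains a CpG cytosine), replace every cytosine by thymine inside each part, and rejoin with the dimer.
import Mathlib
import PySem

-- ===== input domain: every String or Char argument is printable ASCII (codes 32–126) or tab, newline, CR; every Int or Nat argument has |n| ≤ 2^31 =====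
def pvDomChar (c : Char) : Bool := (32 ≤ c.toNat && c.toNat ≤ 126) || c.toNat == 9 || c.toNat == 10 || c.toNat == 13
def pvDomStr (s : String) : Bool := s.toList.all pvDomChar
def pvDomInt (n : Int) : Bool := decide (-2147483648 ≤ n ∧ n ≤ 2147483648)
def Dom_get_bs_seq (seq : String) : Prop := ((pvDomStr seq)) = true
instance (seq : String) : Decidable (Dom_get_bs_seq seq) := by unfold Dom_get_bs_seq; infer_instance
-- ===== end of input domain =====

-- B replaces A's find-and-resplice index loop by a partition: split on the CpG dimer, replace C with T inside each part, rejoin with the dimer (one pass instead of a fresh string splice per converted C).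


-- ===== PORT A =====
-- A's while loop: i scans forward with seq.find("C", i); fuel = len+1 suffices because i strictly increases each iteration.
def aLoop : Nat → List Char → Nat → List Char
  | 0, s, _ => s
  | fuel+1, s, i =>
    if i < s.length then
      let j := PySem.Chars.findFrom s ['C'] (i : Int) none
      if j < 0 then s
      else
        let jn := j.toNat
        let s' := if s.length ≤ jn + 1 ∨ PySem.List.pyGet? s ((jn : Int) + 1) ≠ some 'G' then
            PySem.List.slice s none (some (jn : Int)) ++ ['T'] ++
              PySem.List.slice s (some ((jn : Int) + 1)) none
          else s
        aLoop fuel s' (jn + 1)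
    else s

def get_bs_seq (seq : String) : String :=
  let s := PySem.Chars.upper seq.toList
  String.mk (aLoop (s.length + 1) s 0)

-- ===== PORT B =====
def get_bs_seq_alt (seq : String) : String :=
  let parts := PySem.Chars.splitOn (PySem.Chars.upper seq.toList) ['C', 'G']
  String.mk (PySem.Chars.join ['C', 'G'] (parts.map (fun p => PySem.Chars.replace p ['C'] ['T'])))

-- ===== PRECONDITION & SPEC =====
def Spec_get_bs_seq (seq : String) (out : String) : Prop := out = get_bs_seq_alt seq
instance (seq : String) (out : String) : Decidable (Spec_get_bs_seq seq out) := by unfold Spec_get_bs_seq; infer_instance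

-- ===== CLAIM (what is proved, stated in full; the proofs are below) =====
def Claim_equal_get_bs_seq : Prop := ∀ (seq : String), Dom_get_bs_seq seq → Spec_get_bs_seq seq (get_bs_seq seq)

-- ===== LEMMAS AND PROOFS =====

-- the common characterisation: C becomes T unless followed by G
def convS : List Char → List Char
  | [] => []
  | c :: t => (if c = 'C' ∧ t.head? ≠ some 'G' then 'T' else c) :: convS t


def fBS (c : Char) : Char := if c = 'C' then 'T' else c


def sp : List Char → List (List Char)
  | [] => [[]]
  | 'C' :: 'G' :: t => [] :: sp t
  | c :: t =>
    match sp t with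
    | [] => [[c]]
    | h :: r => (c :: h) :: r


theorem sp_ne_nil (l : List Char) : sp l ≠ [] := by
  fun_induction sp l <;> simp_all

theorem replace_go_single : ∀ (fuel : Nat) (l acc : List Char), l.length ≤ fuel →
    PySem.Chars.replace.go ['C'] ['T'] fuel l acc = acc.reverse ++ l.map fBS := by
  intro fuel
  induction fuel with
  | zero => intro l acc h; simp at h; subst h; simp [PySem.Chars.replace.go]
  | succ n ih =>
    intro l acc h
    match l with
    | [] => simp [PySem.Chars.replace.go]
    | c :: t =>
      rw [PySem.Chars.replace.go]
      by_cases hc : c = 'C'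
      · subst hc
        have hpf : List.isPrefixOf ['C'] ('C' :: t) = true := by simp [List.isPrefixOf]
        rw [hpf]
        simp only [if_true]
        have hd : List.drop ['C'].length ('C' :: t) = t := rfl
        rw [hd, ih t _ (by simp at h ⊢; omega)]
        simp [fBS]
      · have hpf : List.isPrefixOf ['C'] (c :: t) = false := by
          simp [List.isPrefixOf]; exact fun hh => absurd hh.symm hc
        rw [hpf]
        simp only [Bool.false_eq_true, if_false]
        rw [ih t (c :: acc) (by simp at h ⊢; omega)]
        simp [fBS, hc]

theorem replace_single (p : List Char) : PySem.Chars.replace p ['C'] ['T'] = p.map fBS := by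
  rw [PySem.Chars.replace]
  simp [replace_go_single p.length p [] le_rfl]

theorem go_split : ∀ (fuel : Nat) (l cur : List Char) (acc : List (List Char)), l.length < fuel →
    PySem.Chars.splitOn.go ['C','G'] fuel l cur acc =
      acc.reverse ++ (match sp l with
        | [] => []
        | h :: r => (cur.reverse ++ h) :: r) := by
  intro fuel
  induction fuel with
  | zero => omega
  | succ n ih =>
    intro l cur acc h
    rcases l with _ | ⟨c, t⟩
    · simp [PySem.Chars.splitOn.go, sp]
    · by_cases hcg : c = 'C' ∧ t.head? = some 'G'
      · obtain ⟨rfl, hg⟩ := hcg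
        rcases t with _ | ⟨d, t2⟩
        · simp at hg
        · simp at hg; subst hg
          rw [PySem.Chars.splitOn.go]
          have hpf : List.isPrefixOf ['C','G'] ('C'::'G'::t2) = true := by simp [List.isPrefixOf]
          rw [hpf]
          simp only [if_true]
          have hd : List.drop ['C','G'].length ('C' :: 'G' :: t2) = t2 := rfl
          rw [hd, ih t2 [] (cur.reverse :: acc) (by simp at h ⊢; omega)]
          have hne := sp_ne_nil t2
          rcases hsp : sp t2 with _ | ⟨h1, r⟩
          · exact absurd hsp hne
          · simp [sp, hsp]
      · have hpf : List.isPrefixOf ['C','G'] (c::t) = false := by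
          rcases t with _ | ⟨d, t2⟩
          · simp [List.isPrefixOf]
          · simp [List.isPrefixOf]
            intro h1 h2
            exact absurd ⟨h1.symm, by simp [h2.symm]⟩ hcg
        rw [PySem.Chars.splitOn.go, hpf]
        simp only [Bool.false_eq_true, if_false]
        rw [ih t (c :: cur) acc (by simp at h ⊢; omega)]
        have hne := sp_ne_nil t
        rcases hsp : sp t with _ | ⟨h1, r⟩
        · exact absurd hsp hne
        · rw [sp.eq_3 c t (by rintro t1 rfl rfl; exact hcg ⟨rfl, rfl⟩), hsp]
          simp

theorem splitOn_sp (s : List Char) : PySem.Chars.splitOn s ['C','G'] = sp s := by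
  rw [PySem.Chars.splitOn, go_split (s.length + 1) s [] [] (by omega)]
  have hne := sp_ne_nil s
  rcases hsp : sp s with _ | ⟨h1, r⟩
  · exact absurd hsp hne
  · simp

theorem join_cons_head (sep x : List Char) (h : List Char) (r : List (List Char)) :
    PySem.Chars.join sep ((x ++ h) :: r) = x ++ PySem.Chars.join sep (h :: r) := by
  rcases r with _ | ⟨y, r2⟩
  · simp [PySem.Chars.join, List.intercalate]
  · simp [PySem.Chars.join, List.intercalate]

theorem join_map_sp : ∀ (l : List Char),
    PySem.Chars.join ['C','G'] ((sp l).map (List.map fBS)) = convS l := by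
  intro l
  induction l using sp.induct with
  | case1 => simp [sp, convS, PySem.Chars.join, List.intercalate]
  | case2 t ih =>
    rw [sp.eq_2]
    have hne := sp_ne_nil t
    rcases hsp : sp t with _ | ⟨h1, r⟩
    · exact absurd hsp hne
    · rw [hsp] at ih
      simp only [List.map_cons, List.map_nil] at ih ⊢
      have : PySem.Chars.join ['C','G'] ([] :: List.map fBS h1 :: r.map (List.map fBS)) =
          ['C','G'] ++ PySem.Chars.join ['C','G'] (List.map fBS h1 :: r.map (List.map fBS)) := by
        simp [PySem.Chars.join, List.intercalate]
      rw [this, ih]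
      simp [convS]
  | case3 c t hside hsp ih => exact absurd hsp (sp_ne_nil t)
  | case4 c t hside h1 r hsp ih =>
    rw [sp.eq_3 c t hside, hsp]
    rw [hsp] at ih
    simp only [List.map_cons]
    simp only [List.map_cons] at ih
    rw [show (fBS c :: List.map fBS h1) = [fBS c] ++ List.map fBS h1 from rfl, join_cons_head, ih]
    rcases hc : (c == 'C') with _ | _
    · simp at hc
      simp [convS, fBS, hc]
    · simp at hc; subst hc
      have hhd : t.head? ≠ some 'G' := by
        intro hh
        rcases t with _ | ⟨d, t2⟩
        · simp at hh
        · simp at hh; exact hside t2 rfl (by rw [hh])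
      simp [convS, fBS, hhd]

theorem b_conv (s : List Char) :
    PySem.Chars.join ['C', 'G']
      ((PySem.Chars.splitOn s ['C', 'G']).map (fun p => PySem.Chars.replace p ['C'] ['T'])) = convS s := by
  rw [splitOn_sp]
  have hm : (sp s).map (fun p => PySem.Chars.replace p ['C'] ['T']) = (sp s).map (List.map fBS) := by
    apply List.map_congr_left
    intro p _
    exact replace_single p
  rw [hm, join_map_sp]

theorem convS_append_no_C (m r : List Char) (h : ∀ x ∈ m, x ≠ 'C') :
    convS (m ++ r) = m ++ convS r := by
  induction m with
  | nil => simp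
  | cons c t ih =>
    have hc : c ≠ 'C' := h c (by simp)
    simp only [List.cons_append, convS, if_neg (by tauto : ¬(c = 'C' ∧ (t ++ r).head? ≠ some 'G'))]
    rw [ih (fun x hx => h x (by simp [hx]))]

theorem convS_no_C (l : List Char) (h : ∀ x ∈ l, x ≠ 'C') : convS l = l := by
  have := convS_append_no_C l [] h
  simpa [convS] using this

theorem aLoop_conv : ∀ (fuel : Nat) (s : List Char) (i : Nat),
    i ≤ s.length → s.length + 1 ≤ fuel + i →
    aLoop fuel s i = s.take i ++ convS (s.drop i) := by
  intro fuel
  induction fuel with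
  | zero => intro s i h1 h2; omega
  | succ n ih =>
    intro s i h1 h2
    rw [aLoop]
    by_cases hlt : i < s.length
    · simp only [if_pos hlt]
      have hle : i ≤ s.length := le_of_lt hlt
      have hfc := PySem.Chars.findFrom_natCast s ['C'] i hle
      by_cases hfind : PySem.Chars.find (s.drop i) ['C'] = -1
      · rw [hfc, if_pos hfind]
        rw [if_pos (by norm_num : (-1 : Int) < 0)]
        have hnoC : ∀ c ∈ s.drop i, c ≠ 'C' := by
          intro c hc hcC
          have : ['C'] <:+: s.drop i := by
            rw [List.singleton_infix_iff]; rw [← hcC]; exact hc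
          exact (PySem.Chars.find_eq_neg_one_iff _ _ |>.mp hfind) this
        rw [convS_no_C _ hnoC, List.take_append_drop]
      · have hf0 : 0 ≤ PySem.Chars.find (s.drop i) ['C'] := by
          have := PySem.Chars.neg_one_le_find (s.drop i) ['C']
          omega
        have hjge : (0:Int) ≤ PySem.Chars.findFrom s ['C'] (i : Int) none := by
          rw [hfc, if_neg hfind]; positivity
        rw [if_neg (by omega : ¬ PySem.Chars.findFrom s ['C'] (i : Int) none < 0)]
        obtain ⟨hij, hpre, hmin⟩ := PySem.Chars.findFrom_natCast_spec s ['C'] i hle (by omega)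
        set jn := (PySem.Chars.findFrom s ['C'] (i : Int) none).toNat with hjn
        have hijn : i ≤ jn := by omega
        obtain ⟨rest, hrest⟩ := hpre
        simp only [List.singleton_append] at hrest
        have hjnlt : jn < s.length := by
          have hpos : 0 < (s.drop jn).length := by rw [← hrest]; simp
          simp only [List.length_drop] at hpos; omega
        have hrest2 : rest = s.drop (jn+1) := by
          have ht := congrArg List.tail hrest
          simp only [List.tail_drop] at ht
          simpa using ht
        subst rest
        have hmid : ∀ p : Nat, i ≤ p → p < jn → ∀ hp : p < s.length, s[p] ≠ 'C' := by
          intro p hp1 hp2 hp3 hC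
          apply hmin p hp1 hp2
          rw [List.drop_eq_getElem_cons hp3, hC]
          simp
        -- decompose s.drop i = mid ++ s.drop jn, mid has no 'C'
        have hdd : (s.drop i).drop (jn - i) = s.drop jn := by
          rw [List.drop_drop]
          congr 1
          omega
        have hsplit : s.drop i = (s.drop i).take (jn - i) ++ s.drop jn := by
          rw [← hdd, List.take_append_drop]
        have hmidC : ∀ x ∈ (s.drop i).take (jn - i), x ≠ 'C' := by
          intro x hx
          obtain ⟨q, hq, hxq⟩ := List.mem_iff_getElem.mp hx
          have hqlen : q < jn - i := by
            have := List.length_take_le (jn - i) (s.drop i)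
            omega
          have hqlen2 : i + q < s.length := by omega
          rw [List.getElem_take, List.getElem_drop] at hxq
          rw [← hxq]
          exact hmid (i + q) (by omega) (by omega) hqlen2
        have htake : s.take i ++ (s.drop i).take (jn - i) = s.take jn := by
          have h : s.take (i + (jn - i)) = s.take i ++ (s.drop i).take (jn - i) := List.take_add
          rw [show i + (jn - i) = jn by omega] at h
          exact h.symm
        have hconv : convS (s.drop i) = (s.drop i).take (jn - i) ++ convS (s.drop jn) := by
          rw [hsplit, convS_append_no_C _ _ hmidC]
          rw [← hsplit]
        have hhead : (s.drop (jn+1)).head? = s[jn+1]? := List.head?_drop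
        by_cases hG : s[jn+1]? = some 'G'
        · -- no replacement: s[jn+1] = 'G'
          have hcond : ¬ (s.length ≤ jn + 1 ∨ PySem.List.pyGet? s ((jn : Int) + 1) ≠ some 'G') := by
            push_neg
            constructor
            · by_contra hc
              push_neg at hc
              rw [List.getElem?_eq_none (by omega)] at hG
              simp at hG
            · rw [show ((jn : Int) + 1) = ((jn + 1 : Nat) : Int) by push_cast; ring,
                PySem.List.pyGet?_natCast]
              exact hG
          rw [if_neg hcond]
          rw [ih s (jn+1) (by omega) (by omega)]
          have htakes : s.take (jn+1) = s.take jn ++ ['C'] := by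
            rw [List.take_add_one]
            congr 1
            rw [List.getElem?_eq_getElem hjnlt]
            have : s[jn] = 'C' := by
              have := congrArg List.head? hrest
              rw [List.head?_drop, List.getElem?_eq_getElem hjnlt] at this
              simpa using this.symm
            simp [this]
          rw [htakes, hconv, ← hrest]
          have hcv : convS ('C' :: s.drop (jn+1)) = 'C' :: convS (s.drop (jn+1)) := by
            rw [convS]
            rw [if_neg (by rw [hhead]; simp [hG])]
          rw [hcv, ← htake]
          simp
        · -- replacement
          have hcond : s.length ≤ jn + 1 ∨ PySem.List.pyGet? s ((jn : Int) + 1) ≠ some 'G' := by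
            right
            rw [show ((jn : Int) + 1) = ((jn + 1 : Nat) : Int) by push_cast; ring,
              PySem.List.pyGet?_natCast]
            exact hG
          rw [if_pos hcond]
          have hsl1 : PySem.List.slice s none (some (jn : Int)) = s.take jn := by
            rw [PySem.List.slice_to s (by positivity)]
            simp
          have hsl2 : PySem.List.slice s (some ((jn : Int) + 1)) none = s.drop (jn+1) := by
            rw [show ((jn : Int) + 1) = ((jn + 1 : Nat) : Int) by push_cast; ring]
            rw [PySem.List.slice_from s (by positivity)]
            simp
          rw [hsl1, hsl2]
          set s' := s.take jn ++ ['T'] ++ s.drop (jn+1) with hs'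
          have hlen' : s'.length = s.length := by
            rw [hs']
            simp only [List.length_append, List.length_take, List.length_cons, List.length_nil,
              List.length_drop]
            omega
          have hpfx : (s.take jn ++ ['T']).length = jn + 1 := by
            simp only [List.length_append, List.length_take, List.length_cons, List.length_nil]
            omega
          have hdrop' : s'.drop (jn+1) = s.drop (jn+1) := by
            rw [hs']
            exact List.drop_left' hpfx
          have htake' : s'.take (jn+1) = s.take jn ++ ['T'] := by
            rw [hs']
            exact List.take_left' hpfx
          rw [ih s' (jn+1) (by omega) (by omega), hdrop', htake']
          rw [hconv, ← hrest]
          have hcv : convS ('C' :: s.drop (jn+1)) = 'T' :: convS (s.drop (jn+1)) := by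
            rw [convS]
            rw [if_pos ⟨rfl, by rw [hhead]; exact hG⟩]
          rw [hcv, ← htake]
          simp
    · simp only [if_neg hlt]
      have hi : i = s.length := by omega
      subst hi
      simp [convS]

-- ===== VERDICT (by name: the statement is the Claim_ definition above) =====
theorem get_bs_seq_spec : Claim_equal_get_bs_seq := by
  intro seq _
  show _ = _
  simp only [get_bs_seq, get_bs_seq_alt]
  rw [b_conv, aLoop_conv _ _ 0 (by omega) (by omega)]
  simp
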